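-- pv_equiv track=rewrite | github.com/pkapildas/pes_anomaly_detection | cross_ad_combined_cpu.py | new_sequence
-- ===== SOURCE A (Python) =====
-- def new_sequence(label, sequence_original, window):
--     a = max(sequence_original[0][0] - window // 2, 0)
--     sequence_new = []
--     for i in range(len(sequence_original) - 1):
--         if sequence_original[i][1] + window // 2 < sequence_original[i + 1][0] - window // 2:
--             sequence_new.append((a, sequence_original[i][1] + window // 2))
--             a = sequence_original[i + 1][0] - window // 2
--     sequence_new.append((a, min(sequence_original[len(sequence_original) - 1][1] + window // 2, len(label) - 1)))
--     return sequence_new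
-- ===== SOURCE B (Python) =====
-- def new_sequence(label, sequence_original, window):
--     w = window // 2
--     n = len(sequence_original)
--     cuts = [i for i in range(n - 1)
--             if sequence_original[i][1] + w < sequence_original[i + 1][0] - w]
--     bounds = [0] + [c + 1 for c in cuts] + [n]
--     out = [(sequence_original[lo][0] - w, sequence_original[hi - 1][1] + w)
--            for lo, hi in zip(bounds, bounds[1:])]
--     out[0] = (max(out[0][0], 0), out[0][1])
--     out[-1] = (out[-1][0], min(out[-1][1], len(label) - 1))
--     return out
-- ===== Notes on version B (the rewrite author's own statement) =====
-- stated objective: alternative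
-- what changed: A is a single index loop with a running clamped start that emits intervals as it goes; B first computes the list of cut indices (gaps larger than the window), turns them into group boundary positions, maps each boundary pair to an interval by direct indexing, and clamps the global first start and last end afterwards.
-- outside the precondition, e.g. on new_sequence([0, 1], [], 4): A raises IndexError, B raises IndexError
import Mathlib
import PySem

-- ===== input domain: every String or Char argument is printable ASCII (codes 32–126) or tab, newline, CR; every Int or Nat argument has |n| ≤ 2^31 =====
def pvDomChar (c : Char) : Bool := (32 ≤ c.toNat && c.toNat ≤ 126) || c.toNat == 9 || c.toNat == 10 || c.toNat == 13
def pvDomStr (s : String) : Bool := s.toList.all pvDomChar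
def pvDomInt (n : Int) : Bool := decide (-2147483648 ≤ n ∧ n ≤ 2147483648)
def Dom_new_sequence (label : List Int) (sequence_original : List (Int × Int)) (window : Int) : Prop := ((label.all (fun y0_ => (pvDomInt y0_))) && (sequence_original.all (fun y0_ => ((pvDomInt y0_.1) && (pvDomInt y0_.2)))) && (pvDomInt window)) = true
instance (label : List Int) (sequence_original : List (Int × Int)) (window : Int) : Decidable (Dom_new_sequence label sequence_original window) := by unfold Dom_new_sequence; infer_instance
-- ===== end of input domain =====

-- B replaces A's running-accumulator emit loop by computing the cut-index list, mapping
-- boundary pairs to intervals by direct indexing, then clamping first start / last end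
-- (objective: alternative; return value only).

-- ===== PORT A =====
-- Literal port of A: running start `a` clamped at init, index loop over range(len-1)
-- comparing seq[i] with seq[i+1], final append clamped by len(label)-1.
-- The [] case is unreachable under Pre_ (Python raises IndexError on seq[0]).
def new_sequence (label : List Int) (sequence_original : List (Int × Int)) (window : Int) : List (Int × Int) :=
  match sequence_original with
  | [] => []
  | p0 :: _ =>
    let w := PySem.Int.floordiv window 2
    let a0 : Int := max (p0.1 - w) 0
    let st := (List.range (sequence_original.length - 1)).foldl
      (fun (st : Int × List (Int × Int)) i =>
        let pi := sequence_original.getD i (0, 0)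
        let pj := sequence_original.getD (i + 1) (0, 0)
        if pi.2 + w < pj.1 - w then (pj.1 - w, st.2 ++ [(st.1, pi.2 + w)])
        else st) (a0, [])
    st.2 ++ [(st.1, min ((sequence_original.getD (sequence_original.length - 1) (0, 0)).2 + w)
                        ((label.length : Int) - 1))]

-- ===== PORT B =====
-- Literal port of Source B.  cuts = the comprehension over range(n-1); bounds = [0]+[c+1]+[n];
-- out = the boundary-pair comprehension; then the two in-place clamps.
def bcuts (w : Int) (seq : List (Int × Int)) : List Nat :=
  (List.range (seq.length - 1)).filter
    (fun i => decide ((seq.getD i (0, 0)).2 + w < (seq.getD (i + 1) (0, 0)).1 - w))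

def bbounds (w : Int) (seq : List (Int × Int)) : List Nat :=
  0 :: ((bcuts w seq).map (· + 1) ++ [seq.length])

def bout (w : Int) (seq : List (Int × Int)) : List (Int × Int) :=
  ((bbounds w seq).zip (bbounds w seq).tail).map
    (fun lh => ((seq.getD lh.1 (0, 0)).1 - w, (seq.getD (lh.2 - 1) (0, 0)).2 + w))

def new_sequence_alt (label : List Int) (sequence_original : List (Int × Int)) (window : Int) : List (Int × Int) :=
  let w := PySem.Int.floordiv window 2
  match bout w sequence_original with
  | [] => []
  | (s0, e0) :: t =>
    let out2 := (max s0 0, e0) :: t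
    out2.dropLast ++
      (match out2.getLast? with
       | none => []
       | some (ls, le) => [(ls, min le ((label.length : Int) - 1))])

-- ===== PRECONDITION & SPEC =====
-- Pre_ excludes only the empty interval list, on which Python A raises IndexError (seq[0]).
def Pre_new_sequence (label : List Int) (sequence_original : List (Int × Int)) (window : Int) : Prop :=
  sequence_original ≠ []
instance (label : List Int) (sequence_original : List (Int × Int)) (window : Int) : Decidable (Pre_new_sequence label sequence_original window) := by unfold Pre_new_sequence; infer_instance

def pvWitness_new_sequence : List Int × (List (Int × Int)) × Int := ([0, 0, 0, 0, 0], [(1, 1), (3, 4)], 2)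

def Spec_new_sequence (label : List Int) (sequence_original : List (Int × Int)) (window : Int) (out : List (Int × Int)) : Prop := out = new_sequence_alt label sequence_original window
instance (label : List Int) (sequence_original : List (Int × Int)) (window : Int) (out : List (Int × Int)) : Decidable (Spec_new_sequence label sequence_original window out) := by unfold Spec_new_sequence; infer_instance

-- ===== CLAIM (what is proved, stated in full; the proofs are below) =====
def Claim_equal_new_sequence : Prop := ∀ (label : List Int) (sequence_original : List (Int × Int)) (window : Int), Dom_new_sequence label sequence_original window → Pre_new_sequence label sequence_original window → Spec_new_sequence label sequence_original window (new_sequence label sequence_original window)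

-- ===== LEMMAS AND PROOFS =====

-- Common specification used for A: merge of the RAW tail, carrying start cs and
-- expanded running end ce; the nil case performs the final min-clamp.
def mrg (L w : Int) : Int → Int → List (Int × Int) → List (Int × Int)
  | cs, ce, [] => [(cs, min ce (L - 1))]
  | cs, ce, (s, e) :: t =>
      if ce < s - w then (cs, ce) :: mrg L w (s - w) (e + w) t
      else mrg L w cs (e + w) t

-- Clamp-free merge producing group (cs, last end) lists; recursion on adjacent pairs.
def pm2 (w : Int) : Int → List (Int × Int) → List (Int × Int)
  | _, [] => []
  | cs, [p] => [(cs, p.2 + w)]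
  | cs, p :: q :: t =>
      if p.2 + w < q.1 - w then (cs, p.2 + w) :: pm2 w (q.1 - w) (q :: t)
      else pm2 w cs (q :: t)

-- first group's end and the remaining groups, independent of the start parameter
def firstEnd (w : Int) : (Int × Int) → List (Int × Int) → Int
  | p, [] => p.2 + w
  | p, q :: t => if p.2 + w < q.1 - w then p.2 + w else firstEnd w q t

def restGroups (w : Int) : (Int × Int) → List (Int × Int) → List (Int × Int)
  | _, [] => []
  | p, q :: t => if p.2 + w < q.1 - w then pm2 w (q.1 - w) (q :: t) else restGroups w q t

theorem pm2_decomp (w : Int) :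
    ∀ (t : List (Int × Int)) (p : Int × Int) (cs : Int),
      pm2 w cs (p :: t) = (cs, firstEnd w p t) :: restGroups w p t := by
  intro t
  induction t with
  | nil => intro p cs; simp [pm2, firstEnd, restGroups]
  | cons q t ih =>
    intro p cs
    by_cases h : p.2 + w < q.1 - w
    · simp [pm2, firstEnd, restGroups, h]
    · simp only [pm2, firstEnd, restGroups, if_neg h]
      exact ih q cs

theorem getLast?_cons_ne {α : Type} (a : α) (l : List α) (h : l ≠ []) :
    (a :: l).getLast? = l.getLast? := by
  cases l with
  | nil => exact absurd rfl h
  | cons b t => exact List.getLast?_cons_cons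

theorem getD_last {α : Type} (d : α) (l : List α) :
    l.getD (l.length - 1) d = l.getLast?.getD d := by
  rw [List.getD_eq_getElem?_getD, ← List.getLast?_eq_getElem?]

-- generic: fold over range (len-1) with adjacent getD = fold over zip of adjacent pairs
theorem foldl_range_adj {α σ : Type} (d : α) (f : σ → α → α → σ) :
    ∀ (l : List α) (s : σ),
      (List.range (l.length - 1)).foldl (fun st i => f st (l.getD i d) (l.getD (i + 1) d)) s
        = (l.zip l.tail).foldl (fun st p => f st p.1 p.2) s := by
  intro l
  induction l with
  | nil => intro s; simp
  | cons a t ih =>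
    intro s
    cases t with
    | nil => simp
    | cons b t2 =>
      have h1 : (a :: b :: t2).length - 1 = (b :: t2).length - 1 + 1 := by simp
      rw [h1, List.range_succ_eq_map, List.foldl_cons, List.foldl_map]
      simp only [List.getD_cons_zero, List.getD_cons_succ]
      have h2 : List.foldl (fun x y => f x ((b :: t2).getD y d) (t2.getD y d)) (f s a b)
            (List.range ((b :: t2).length - 1))
          = List.foldl (fun st i => f st ((b :: t2).getD i d) ((b :: t2).getD (i + 1) d)) (f s a b)
            (List.range ((b :: t2).length - 1)) := by
        apply List.foldl_ext
        intro st i _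
        rw [List.getD_cons_succ]
      rw [h2, ih]
      simp

-- A's fold (in zip form) plus the final append equals `mrg`.
theorem afold_mrg (L w : Int) :
    ∀ (rest : List (Int × Int)) (prev : Int × Int) (a : Int) (sn : List (Int × Int)),
      ((((prev :: rest).zip rest).foldl
          (fun (st : Int × List (Int × Int)) p =>
            if p.1.2 + w < p.2.1 - w then (p.2.1 - w, st.2 ++ [(st.1, p.1.2 + w)])
            else st) (a, sn)).2
        ++ [(((((prev :: rest).zip rest).foldl
          (fun (st : Int × List (Int × Int)) p =>
            if p.1.2 + w < p.2.1 - w then (p.2.1 - w, st.2 ++ [(st.1, p.1.2 + w)])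
            else st) (a, sn)).1),
             min (((prev :: rest).getLast?.getD (0, 0)).2 + w) (L - 1))])
      = sn ++ mrg L w a (prev.2 + w) rest := by
  intro rest
  induction rest with
  | nil => intro prev a sn; simp [mrg]
  | cons q t ih =>
    intro prev a sn
    simp only [List.zip_cons_cons, List.foldl_cons,
      getLast?_cons_ne prev (q :: t) (by simp)]
    by_cases h : prev.2 + w < q.1 - w
    · simp only [if_pos h]
      rw [ih q (q.1 - w) (sn ++ [(a, prev.2 + w)])]
      simp [mrg, h]
    · simp only [if_neg h]
      rw [ih q a sn]
      simp [mrg, h]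

-- A equals mrg on a nonempty list.
theorem aport_mrg (label : List Int) (p0 : Int × Int) (rest : List (Int × Int)) (window : Int) :
    new_sequence label (p0 :: rest) window
      = mrg ((label.length : Int)) (PySem.Int.floordiv window 2)
          (max (p0.1 - PySem.Int.floordiv window 2) 0) (p0.2 + PySem.Int.floordiv window 2) rest := by
  simp only [new_sequence]
  rw [getD_last, foldl_range_adj ((0, 0) : Int × Int)
    (fun (st : Int × List (Int × Int)) p q =>
      if p.2 + PySem.Int.floordiv window 2 < q.1 - PySem.Int.floordiv window 2 then
        (q.1 - PySem.Int.floordiv window 2, st.2 ++ [(st.1, p.2 + PySem.Int.floordiv window 2)])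
      else st) (p0 :: rest)]
  have := afold_mrg ((label.length : Int)) (PySem.Int.floordiv window 2) rest p0
    (max (p0.1 - PySem.Int.floordiv window 2) 0) []
  simpa using this

-- cons-step characterisation of bcuts
theorem bcuts_cons (w : Int) (p q : Int × Int) (t : List (Int × Int)) :
    bcuts w (p :: q :: t)
      = (if p.2 + w < q.1 - w then [0] else []) ++ (bcuts w (q :: t)).map (· + 1) := by
  simp only [bcuts, List.length_cons, Nat.add_sub_cancel]
  rw [List.range_succ_eq_map, List.filter_cons, List.filter_map]
  have hc : (fun i => decide (((p::q::t).getD i (0,0)).2 + w < ((p::q::t).getD (i+1) (0,0)).1 - w)) ∘ Nat.succ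
      = fun i => decide (((q::t).getD i (0,0)).2 + w < ((q::t).getD (i+1) (0,0)).1 - w) := by
    funext i
    simp [Nat.succ_eq_add_one]
  rw [hc]
  have hsucc : (List.filter (fun i => decide (((q::t).getD i (0,0)).2 + w < ((q::t).getD (i+1) (0,0)).1 - w)) (List.range t.length)).map Nat.succ
      = (List.filter (fun i => decide (((q::t).getD i (0,0)).2 + w < ((q::t).getD (i+1) (0,0)).1 - w)) (List.range t.length)).map (· + 1) := by
    simp
  rw [hsucc]
  by_cases h : p.2 + w < q.1 - w <;> simp [h]

theorem mem_bbounds_tail (w : Int) (seq : List (Int × Int)) (hne : seq ≠ []) :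
    ∀ b ∈ (bbounds w seq).tail, 1 ≤ b := by
  intro b hb
  simp only [bbounds, List.tail_cons, List.mem_append, List.mem_map, List.mem_singleton] at hb
  rcases hb with ⟨c, _, rfl⟩ | rfl
  · omega
  · cases seq with
    | nil => exact absurd rfl hne
    | cons a t => simp

-- shift lemma

-- shift lemma: the mapped (+1) boundary list of the tail, read through p :: seq, is bout of the tail
theorem bout_shift (w : Int) (p q : Int × Int) (t2 : List (Int × Int)) :
    List.map (fun lh => (((p::q::t2).getD lh.1 (0,0)).1 - w, ((p::q::t2).getD (lh.2 - 1) (0,0)).2 + w))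
      (((bbounds w (q::t2)).map (· + 1)).zip ((bbounds w (q::t2)).map (· + 1)).tail)
    = bout w (q::t2) := by
  rw [← List.map_tail, List.zip_map, List.map_map, bout]
  apply List.map_congr_left
  intro x hx
  obtain ⟨a, b⟩ := x
  have hb : 1 ≤ b := mem_bbounds_tail w (q::t2) (by simp) b (List.of_mem_zip hx).2
  simp only [Function.comp, Prod.map]
  have h1 : ((p::q::t2).getD (a+1) (0,0)) = ((q::t2).getD a (0,0)) := List.getD_cons_succ
  have h2 : b + 1 - 1 = (b - 1) + 1 := by omega
  have h3 : ((p::q::t2).getD ((b-1)+1) (0,0)) = ((q::t2).getD (b-1) (0,0)) := List.getD_cons_succ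
  rw [h1, h2, h3]

-- the key lemma: B's boundary-pair construction equals pm2 with start head.1 - w
theorem bout_pm2 (w : Int) :
    ∀ (t : List (Int × Int)) (p : Int × Int),
      bout w (p :: t) = pm2 w (p.1 - w) (p :: t) := by
  intro t
  induction t with
  | nil => intro p; simp [bout, bbounds, bcuts, pm2]
  | cons q t2 ih =>
    intro p
    by_cases h : p.2 + w < q.1 - w
    · -- cut at 0
      have hb : bbounds w (p::q::t2) = 0 :: (bbounds w (q::t2)).map (· + 1) := by
        simp only [bbounds, bcuts_cons, h, if_pos, List.map_append, List.map_map,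
          List.map_cons, List.length_cons]
        simp
      have hmap : (bbounds w (q::t2)).map (· + 1)
          = 1 :: (((bcuts w (q::t2)).map (· + 1)).map (· + 1) ++ [(q::t2).length + 1]) := by
        simp [bbounds]
      rw [show bout w (p::q::t2) = ((bbounds w (p::q::t2)).zip (bbounds w (p::q::t2)).tail).map
        (fun lh => (((p::q::t2).getD lh.1 (0,0)).1 - w, ((p::q::t2).getD (lh.2 - 1) (0,0)).2 + w)) from rfl]
      rw [hb]
      rw [List.tail_cons]
      conv_lhs => rw [hmap]
      rw [show ((0 : Nat) :: 1 :: (((bcuts w (q::t2)).map (· + 1)).map (· + 1) ++ [(q::t2).length + 1])).zip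
            (1 :: (((bcuts w (q::t2)).map (· + 1)).map (· + 1) ++ [(q::t2).length + 1]))
          = (0, 1) :: ((1 :: (((bcuts w (q::t2)).map (· + 1)).map (· + 1) ++ [(q::t2).length + 1])).zip
              ((((bcuts w (q::t2)).map (· + 1)).map (· + 1) ++ [(q::t2).length + 1]))) from rfl]
      rw [List.map_cons]
      rw [show ((1 : Nat) :: (((bcuts w (q::t2)).map (· + 1)).map (· + 1) ++ [(q::t2).length + 1]))
          = (bbounds w (q::t2)).map (· + 1) from hmap.symm]
      rw [show (((bcuts w (q::t2)).map (· + 1)).map (· + 1) ++ [(q::t2).length + 1])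
          = ((bbounds w (q::t2)).map (· + 1)).tail from by rw [hmap, List.tail_cons]]
      rw [bout_shift, ih]
      simp [pm2, h]
    · -- no cut at 0
      have hb : bbounds w (p::q::t2)
          = 0 :: (((bcuts w (q::t2)).map (· + 1)).map (· + 1) ++ [(q::t2).length + 1]) := by
        simp [bbounds, bcuts_cons, h]
      have hmap : (bbounds w (q::t2)).map (· + 1)
          = 1 :: (((bcuts w (q::t2)).map (· + 1)).map (· + 1) ++ [(q::t2).length + 1]) := by
        simp [bbounds]
      -- rest1 nonempty
      have hshift := bout_shift w p q t2
      rw [hmap] at hshift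
      rw [ih] at hshift
      rw [pm2_decomp] at hshift
      -- now hshift : map f (zip (1::rest1) rest1) = (q.1-w, firstEnd) :: restGroups
      rw [show bout w (p::q::t2) = ((bbounds w (p::q::t2)).zip (bbounds w (p::q::t2)).tail).map
        (fun lh => (((p::q::t2).getD lh.1 (0,0)).1 - w, ((p::q::t2).getD (lh.2 - 1) (0,0)).2 + w)) from rfl]
      rw [hb, List.tail_cons]
      -- case on rest1 to expose head pair
      cases hr : (((bcuts w (q::t2)).map (· + 1)).map (· + 1) ++ [(q::t2).length + 1]) with
      | nil => exact absurd hr (by simp)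
      | cons r1h r1t =>
        rw [hr] at hshift
        rw [List.tail_cons] at hshift
        simp only [List.zip_cons_cons, List.map_cons] at hshift ⊢
        -- hshift : (f(1,r1h)) :: map f (zip r1t' ...) hmm
        have h12 := List.cons_eq_cons.mp hshift
        have hEnd := congrArg Prod.snd h12.1
        have hTail := h12.2
        rw [pm2_decomp]
        simp only [firstEnd, restGroups, if_neg h, List.getD_cons_zero]
        refine List.cons_eq_cons.mpr ⟨?_, hTail⟩
        exact Prod.ext rfl hEnd

-- clamping the last end of pm2 yields mrg
theorem clampLast_pm2 (L w : Int) :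
    ∀ (t : List (Int × Int)) (p : Int × Int) (cs : Int),
      ((pm2 w cs (p :: t)).dropLast ++
        (match (pm2 w cs (p :: t)).getLast? with
         | none => []
         | some (ls, le) => [(ls, min le (L - 1))]))
      = mrg L w cs (p.2 + w) t := by
  intro t
  induction t with
  | nil => intro p cs; simp [pm2, mrg]
  | cons q t ih =>
    intro p cs
    by_cases h : p.2 + w < q.1 - w
    · simp only [pm2, if_pos h, mrg]
      have hne : pm2 w (q.1 - w) (q :: t) ≠ [] := by
        rw [pm2_decomp]; simp
      rw [List.dropLast_cons_of_ne_nil hne, getLast?_cons_ne _ _ hne, List.cons_append]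
      rw [ih q (q.1 - w)]
    · simp only [pm2, if_neg h, mrg]
      exact ih q cs

-- B equals mrg with the clamped initial start, on a nonempty list.
theorem bport_mrg (label : List Int) (p0 : Int × Int) (rest : List (Int × Int)) (window : Int) :
    new_sequence_alt label (p0 :: rest) window
      = mrg ((label.length : Int)) (PySem.Int.floordiv window 2)
          (max (p0.1 - PySem.Int.floordiv window 2) 0) (p0.2 + PySem.Int.floordiv window 2) rest := by
  have h1 : new_sequence_alt label (p0 :: rest) window
      = (((max (p0.1 - PySem.Int.floordiv window 2) 0,
            firstEnd (PySem.Int.floordiv window 2) p0 rest) ::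
            restGroups (PySem.Int.floordiv window 2) p0 rest).dropLast ++
         (match ((max (p0.1 - PySem.Int.floordiv window 2) 0,
            firstEnd (PySem.Int.floordiv window 2) p0 rest) ::
            restGroups (PySem.Int.floordiv window 2) p0 rest).getLast? with
          | none => []
          | some (ls, le) => [(ls, min le ((label.length : Int) - 1))])) := by
    simp only [new_sequence_alt]
    rw [bout_pm2, pm2_decomp]
  rw [h1,
    show (max (p0.1 - PySem.Int.floordiv window 2) 0,
          firstEnd (PySem.Int.floordiv window 2) p0 rest) ::
          restGroups (PySem.Int.floordiv window 2) p0 rest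
        = pm2 (PySem.Int.floordiv window 2)
            (max (p0.1 - PySem.Int.floordiv window 2) 0) (p0 :: rest)
      from (pm2_decomp _ _ _ _).symm,
    clampLast_pm2]

-- ===== VERDICT (by name: the statement is the Claim_ definition above) =====
theorem new_sequence_spec : Claim_equal_new_sequence := by
  intro label seq window _ hpre
  unfold Spec_new_sequence
  cases seq with
  | nil => exact absurd rfl hpre
  | cons p0 rest => rw [aport_mrg, bport_mrg]
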